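-- pv_equiv track=rewrite | github.com/Floorp-Projects/Floorp | xpcom/components/gen_static_components.py | gen_decls
-- ===== SOURCE A (Python) =====
-- class Namespace(object):
--     def __init__(self, name=None):
--         self.name = name
--         self.classes = set()
--         self.namespaces = {}
--
--     # Returns a Namespace object for the sub-namespace with the given name.
--     def sub(self, name):
--         assert name not in self.classes
--
--         if name not in self.namespaces:
--             self.namespaces[name] = Namespace(name)
--         return self.namespaces[name]
--
--     # Generates C++ code to pre-declare all classes in this namespace and all
--     # of its sub-namespaces.
--     def to_cxx(self):
--         res = ""
--         if self.name:
--             res += "namespace %s {\n" % self.name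
--
--         for clas in sorted(self.classes):
--             res += "class %s;\n" % clas
--
--         for ns in sorted(self.namespaces.keys()):
--             res += self.namespaces[ns].to_cxx()
--
--         if self.name:
--             res += "}  // namespace %s\n" % self.name
--
--         return res
--
-- def gen_decls(types):
--     root_ns = Namespace()
--
--     for type_ in sorted(types):
--         parts = type_.split("::")
--
--         ns = root_ns
--         for part in parts[:-1]:
--             ns = ns.sub(part)
--         ns.classes.add(parts[-1])
--
--     return root_ns.to_cxx()
-- ===== SOURCE B (Python) =====
-- def gen_decls(types):
--     def emit(paths, name):
--         res = "namespace %s {\n" % name if name else ""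
--         for c in sorted({p[0] for p in paths if len(p) == 1}):
--             res += "class %s;\n" % c
--         for ns in sorted({p[0] for p in paths if len(p) > 1}):
--             res += emit([p[1:] for p in paths if len(p) > 1 and p[0] == ns], ns)
--         if name:
--             res += "}  // namespace %s\n" % name
--         return res
--     return emit([t.split("::") for t in types], None)
-- ===== Notes on version B (the rewrite author's own statement) =====
-- stated objective: simpler
-- what changed: B drops the mutable Namespace trie (class with set/dict fields) and its two phases (build tree, then DFS to_cxx): it splits each type once and emits the declarations by a single recursive grouping over the split paths, partitioning on the leading namespace segment at each level.
import Mathlib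
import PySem

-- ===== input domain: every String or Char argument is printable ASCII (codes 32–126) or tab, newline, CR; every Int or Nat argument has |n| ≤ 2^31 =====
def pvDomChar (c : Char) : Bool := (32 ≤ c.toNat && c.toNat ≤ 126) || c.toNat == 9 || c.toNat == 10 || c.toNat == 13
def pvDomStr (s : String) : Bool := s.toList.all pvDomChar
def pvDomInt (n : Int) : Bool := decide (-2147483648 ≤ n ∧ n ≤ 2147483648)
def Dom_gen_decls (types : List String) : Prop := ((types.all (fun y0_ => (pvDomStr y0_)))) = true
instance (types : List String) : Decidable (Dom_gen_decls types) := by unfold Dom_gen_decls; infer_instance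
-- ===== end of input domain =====

-- B replaces the mutable Namespace trie + two-phase build/DFS by one recursive grouping
-- pass over the split name paths (objective: simpler; equal on every input where A returns).

-- ===== PORT A =====
-- Names are carried as List Char (Lean's own String operations are kernel-opaque).
-- t.split("::"): the separator is non-empty, so Python never raises; PySem.Chars.splitOn is the exact form.
def splitPath (t : String) : List (List Char) :=
  PySem.Chars.splitOn t.toList "::".toList

-- The Namespace tree: name, set of classes, dict of sub-namespaces (assoc structure in
-- insertion order; a mutual pair instead of a nested inductive).
mutual
inductive NSTree : Type where
  | mk : Option (List Char) → PySem.Set (List Char) → NSMap → NSTree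
inductive NSMap : Type where
  | nil : NSMap
  | cons : List Char → NSTree → NSMap → NSMap
end

-- dict lookup: first (= unique) match
def mapFind? : NSMap → List Char → Option NSTree
  | .nil, _ => none
  | .cons k v r, x => if x = k then some v else mapFind? r x

-- dict assignment: overwrite in place, else append
def mapSet : NSMap → List Char → NSTree → NSMap
  | .nil, x, v => .cons x v .nil
  | .cons k w r, x, v => if x = k then .cons k v r else .cons k w (mapSet r x v)

def mapEntries : NSMap → List (List Char × NSTree)
  | .nil => []
  | .cons k v r => (k, v) :: mapEntries r

mutual
def sizeT : NSTree → Nat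
  | .mk _ _ m => sizeM m + 1
def sizeM : NSMap → Nat
  | .nil => 0
  | .cons _ v r => sizeT v + sizeM r
end

-- self.sub(part) (the assert fires exactly on the inputs excluded by Pre_ below, where
-- Python raises AssertionError; on admitted inputs it always passes, so it is not modelled)
def subOrNew (m : NSMap) (x : List Char) : NSTree :=
  match mapFind? m x with
  | some t => t
  | none => NSTree.mk (some x) PySem.Set.empty NSMap.nil

-- the body of gen_decls' for-loop: walk parts[:-1] via sub, add parts[-1] to classes
-- (the in-place mutation becomes a functional update along the path)
def insertPath : NSTree → List (List Char) → NSTree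
  | t, [] => t          -- unreachable: split never returns []
  | .mk nm cls m, [c] => .mk nm (PySem.Set.add cls c) m
  | .mk nm cls m, x :: y :: rest =>
      .mk nm cls (mapSet m x (insertPath (subOrNew m x) (y :: rest)))

-- Namespace.to_cxx. Python iterates sorted(self.namespaces.keys()) and looks each key up;
-- dict keys are unique, so that is exactly the entry list sorted by key.  The fuel argument
-- only makes the recursion structural for the kernel; gen_decls passes fuel ≥ sizeT, which
-- is never exhausted.
def toCxx : Nat → NSTree → List Char
  | 0, _ => []
  | fuel + 1, .mk nm cls m =>
    let res0 : List Char :=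
      match nm with
      | some n => if n = [] then [] else "namespace ".toList ++ n ++ " {\n".toList
      | none => []
    let res1 := (PySem.List.sorted cls (fun x => x) false).foldl
        (fun r c => r ++ "class ".toList ++ c ++ ";\n".toList) res0
    let res2 := (PySem.List.sorted (mapEntries m) (fun e => e.1) false).foldl
        (fun r e => r ++ toCxx fuel e.2) res1
    match nm with
    | some n => if n = [] then res2 else res2 ++ "}  // namespace ".toList ++ n ++ "\n".toList
    | none => res2

def gen_decls (types : List String) : String :=
  let root := (PySem.List.sorted types (fun x => x) false).foldl
      (fun ns t => insertPath ns (splitPath t))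
      (NSTree.mk none PySem.Set.empty NSMap.nil)
  String.ofList (toCxx (sizeT root) root)

-- ===== PORT B =====
-- t.split("::") (non-empty separator, exact form)
def altSplit (t : String) : List (List Char) :=
  PySem.Chars.splitOn t.toList "::".toList

-- {p[0] for p in paths if len(p) == 1}  (as a list comprehension fed to set())
def heads1 (paths : List (List (List Char))) : List (List Char) :=
  (paths.filter (fun p => p.length == 1)).filterMap List.head?

-- {p[0] for p in paths if len(p) > 1}
def headsN (paths : List (List (List Char))) : List (List Char) :=
  (paths.filter (fun p => decide (1 < p.length))).filterMap List.head?

-- [p[1:] for p in paths if len(p) > 1 and p[0] == ns]   (p[1:] = drop 1, start ≥ 0)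
def group (ns : List Char) (paths : List (List (List Char))) : List (List (List Char)) :=
  (paths.filter (fun p => decide (1 < p.length) && (p.head? == some ns))).map (fun p => p.drop 1)

def sumLen (paths : List (List (List Char))) : Nat := (paths.map List.length).sum

-- emit(paths, name).  The fuel argument only makes the recursion structural for the
-- kernel; gen_decls_alt passes fuel > sumLen, which is never exhausted.
def emitB : Nat → List (List (List Char)) → Option (List Char) → List Char
  | 0, _, _ => []
  | fuel + 1, paths, name =>
    let res0 : List Char :=
      match name with
      | some n => if n = [] then [] else "namespace ".toList ++ n ++ " {\n".toList
      | none => []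
    let res1 := (PySem.List.sorted (PySem.Set.ofList (heads1 paths)) (fun x => x) false).foldl
        (fun r c => r ++ "class ".toList ++ c ++ ";\n".toList) res0
    let res2 := (PySem.List.sorted (PySem.Set.ofList (headsN paths)) (fun x => x) false).foldl
        (fun r ns => r ++ emitB fuel (group ns paths) (some ns)) res1
    match name with
    | some n => if n = [] then res2 else res2 ++ "}  // namespace ".toList ++ n ++ "\n".toList
    | none => res2

def gen_decls_alt (types : List String) : String :=
  let paths := types.map altSplit
  String.ofList (emitB (sumLen paths + 1) paths none)

-- ===== PRECONDITION & SPEC =====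
-- Pre_ excludes exactly the inputs where A raises AssertionError in Namespace.sub: some
-- type's '::'-path is a proper prefix of another type's path (a name used both as a class
-- and as a namespace under the same parent).
def Pre_gen_decls (types : List String) : Prop :=
  ∀ t1 ∈ types, ∀ t2 ∈ types,
    PySem.Chars.splitOn t1.toList "::".toList <+: PySem.Chars.splitOn t2.toList "::".toList →
    PySem.Chars.splitOn t1.toList "::".toList = PySem.Chars.splitOn t2.toList "::".toList
instance (types : List String) : Decidable (Pre_gen_decls types) := by
  unfold Pre_gen_decls; infer_instance

def pvWitness_gen_decls : List String := ["mozilla::dom::Promise", "nsIFoo", "mozilla::OriginAttributes"]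

def Spec_gen_decls (types : List String) (out : String) : Prop := out = gen_decls_alt types
instance (types : List String) (out : String) : Decidable (Spec_gen_decls types out) := by
  unfold Spec_gen_decls; infer_instance

-- ===== CLAIM (what is proved, stated in full; the proofs are below) =====
def Claim_equal_gen_decls : Prop := ∀ (types : List String), Dom_gen_decls types → Pre_gen_decls types → Spec_gen_decls types (gen_decls types)

-- ===== LEMMAS AND PROOFS =====

-- accessors used only by the proofs
def nsName : NSTree → Option (List Char) | .mk n _ _ => n
def nsClasses : NSTree → PySem.Set (List Char) | .mk _ c _ => c
def nsSubs : NSTree → NSMap | .mk _ _ m => m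

def Build (nm : Option (List Char)) (L : List (List (List Char))) : NSTree :=
  L.foldl insertPath (NSTree.mk nm PySem.Set.empty NSMap.nil)
def mapKeys (m : NSMap) : List (List Char) := (mapEntries m).map Prod.fst

theorem ofList_snoc {α : Type} [BEq α] (l : List α) (x : α) :
    PySem.Set.ofList (l ++ [x]) = PySem.Set.add (PySem.Set.ofList l) x := by
  rw [PySem.Set.ofList_eq_foldl, PySem.Set.ofList_eq_foldl, List.foldl_append]
  rfl

theorem heads1_snoc1 (L : List (List (List Char))) (c : List Char) :
    heads1 (L ++ [[c]]) = heads1 L ++ [c] := by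
  simp [heads1]

theorem heads1_snoc_other (L : List (List (List Char))) (p : List (List Char)) (h : p.length ≠ 1) :
    heads1 (L ++ [p]) = heads1 L := by
  simp [heads1, h]

theorem headsN_snoc_long (L : List (List (List Char))) (x y : List Char) (rest : List (List Char)) :
    headsN (L ++ [x :: y :: rest]) = headsN L ++ [x] := by
  simp [headsN]

theorem headsN_snoc_short (L : List (List (List Char))) (p : List (List Char)) (h : ¬ 1 < p.length) :
    headsN (L ++ [p]) = headsN L := by
  simp [headsN, h]

theorem group_snoc_long (k : List Char) (L : List (List (List Char))) (x y : List Char) (rest : List (List Char)) :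
    group k (L ++ [x :: y :: rest]) = group k L ++ (if x = k then [y :: rest] else []) := by
  by_cases h : x = k <;> simp [group, h]

theorem group_snoc_short (k : List Char) (L : List (List (List Char))) (p : List (List Char)) (h : ¬ 1 < p.length) :
    group k (L ++ [p]) = group k L := by
  simp [group, h]

theorem build_snoc (nm : Option (List Char)) (L : List (List (List Char))) (p : List (List Char)) :
    Build nm (L ++ [p]) = insertPath (Build nm L) p := by
  simp [Build, List.foldl_append]

theorem build_name (nm : Option (List Char)) (L : List (List (List Char))) :
    nsName (Build nm L) = nm := by
  induction L using List.reverseRecOn with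
  | nil => rfl
  | append_singleton L p ih =>
    rw [build_snoc]
    rcases p with _ | ⟨x, _ | ⟨y, rest⟩⟩
    · exact ih
    · rcases hB : Build nm L with ⟨n, c, m⟩; rw [hB] at ih; simpa [insertPath, nsName] using ih
    · rcases hB : Build nm L with ⟨n, c, m⟩; rw [hB] at ih; simpa [insertPath, nsName] using ih

theorem build_classes (nm : Option (List Char)) (L : List (List (List Char))) :
    nsClasses (Build nm L) = PySem.Set.ofList (heads1 L) := by
  induction L using List.reverseRecOn with
  | nil => rfl
  | append_singleton L p ih =>
    rw [build_snoc]
    rcases p with _ | ⟨x, _ | ⟨y, rest⟩⟩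
    · simpa [heads1] using ih
    · rw [heads1_snoc1, ofList_snoc, ← ih]
      rcases hB : Build nm L with ⟨n, c, m⟩; rfl
    · rw [heads1_snoc_other _ _ (by simp)]
      rw [← ih]; rcases hB : Build nm L with ⟨n, c, m⟩; rfl

theorem mapKeys_mapSet : ∀ (m : NSMap) (x : List Char) (v : NSTree),
    mapKeys (mapSet m x v) = if x ∈ mapKeys m then mapKeys m else mapKeys m ++ [x]
  | .nil, x, v => by simp [mapKeys, mapSet, mapEntries]
  | .cons k w r, x, v => by
    by_cases h : x = k
    · simp [mapKeys, mapSet, mapEntries, h]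
    · simp only [mapSet, if_neg h]
      have ih := mapKeys_mapSet r x v
      simp only [mapKeys, mapEntries, List.map_cons] at ih ⊢
      rw [ih]
      by_cases hm : x ∈ (mapEntries r).map Prod.fst <;> simp [hm, h]

theorem mapFind?_mapSet : ∀ (m : NSMap) (x : List Char) (v : NSTree) (k : List Char),
    mapFind? (mapSet m x v) k = if k = x then some v else mapFind? m k
  | .nil, x, v, k => by
    by_cases h : k = x <;> simp [mapSet, mapFind?, h]
  | .cons k' w r, x, v, k => by
    by_cases h : x = k'
    · subst h
      by_cases hk : k = x <;> simp [mapSet, mapFind?, hk]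
    · simp only [mapSet, if_neg h]
      by_cases hk : k = k'
      · subst hk; simp [mapFind?, Ne.symm h]
      · simp [mapFind?, hk, mapFind?_mapSet r x v k]

theorem headsN_cons_long (x y : List Char) (r L) :
    headsN ((x :: y :: r) :: L) = x :: headsN L := by simp [headsN]

theorem headsN_cons_short (p L) (h : ¬ 1 < p.length) : headsN (p :: L) = headsN L := by
  simp [headsN, h]

theorem group_cons_long (k x y : List Char) (r L) :
    group k ((x :: y :: r) :: L) = (if x = k then [y :: r] else []) ++ group k L := by
  by_cases h : x = k <;> simp [group, h]

theorem group_cons_short (k : List Char) (p L) (h : ¬ 1 < p.length) : group k (p :: L) = group k L := by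
  simp [group, h]

theorem groupOf_not_mem (k : List Char) (L : List (List (List Char))) (h : k ∉ headsN L) :
    group k L = [] := by
  induction L with
  | nil => rfl
  | cons p rest ih =>
    rcases p with _ | ⟨x, _ | ⟨y, r⟩⟩
    · rw [group_cons_short _ _ _ (by simp)]; exact ih (by rwa [headsN_cons_short _ _ (by simp)] at h)
    · rw [group_cons_short _ _ _ (by simp)]; exact ih (by rwa [headsN_cons_short _ _ (by simp)] at h)
    · rw [headsN_cons_long, List.mem_cons, not_or] at h
      rw [group_cons_long, if_neg (fun he => h.1 he.symm)]
      simpa using ih h.2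

theorem setAdd_eq {α : Type} [BEq α] [LawfulBEq α] (s : PySem.Set α) (x : α) :
    PySem.Set.add s x = if x ∈ s then s else s ++ [x] := by
  by_cases h : x ∈ s <;> simp [PySem.Set.add, PySem.Set.contains, h]

theorem build_keys (nm : Option (List Char)) (L : List (List (List Char))) :
    mapKeys (nsSubs (Build nm L)) = PySem.Set.ofList (headsN L) := by
  induction L using List.reverseRecOn with
  | nil => rfl
  | append_singleton L p ih =>
    rw [build_snoc]
    rcases p with _ | ⟨x, _ | ⟨y, rest⟩⟩
    · simpa [headsN] using ih
    · rw [headsN_snoc_short _ _ (by simp), ← ih]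
      rcases hB : Build nm L with ⟨n, c, m⟩; rfl
    · rw [headsN_snoc_long, ofList_snoc, ← ih]
      rcases hB : Build nm L with ⟨n, c, m⟩
      simp only [insertPath, nsSubs, mapKeys_mapSet]
      rw [setAdd_eq]

theorem build_find (nm : Option (List Char)) (L : List (List (List Char))) (k : List Char) :
    mapFind? (nsSubs (Build nm L)) k =
      if k ∈ headsN L then some (Build (some k) (group k L)) else none := by
  induction L using List.reverseRecOn generalizing k with
  | nil => simp [Build, nsSubs, mapFind?, headsN]
  | append_singleton L p ih =>
    rw [build_snoc]
    rcases p with _ | ⟨x, _ | ⟨y, rest⟩⟩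
    · rw [headsN_snoc_short _ _ (by simp), group_snoc_short _ _ _ (by simp), ← ih k]
      rcases hB : Build nm L with ⟨n, c, m⟩; rfl
    · rw [headsN_snoc_short _ _ (by simp), group_snoc_short _ _ _ (by simp)]
      rw [← ih k]
      rcases hB : Build nm L with ⟨n, c, m⟩; rfl
    · rcases hB : Build nm L with ⟨n, c, m⟩
      have ih' : ∀ k, mapFind? m k =
          if k ∈ headsN L then some (Build (some k) (group k L)) else none := by
        intro k; have h := ih k; rw [hB] at h; simpa [nsSubs] using h
      simp only [insertPath, nsSubs, mapFind?_mapSet]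
      rw [headsN_snoc_long, group_snoc_long]
      by_cases hk : k = x
      · subst hk
        simp only [List.mem_append, List.mem_singleton, or_true, if_pos]
        rw [show (subOrNew m k) = match mapFind? m k with
            | some t => t | none => NSTree.mk (some k) PySem.Set.empty NSMap.nil from rfl]
        rw [ih' k]
        by_cases hmem : k ∈ headsN L
        · rw [if_pos hmem]
          rw [← build_snoc]
        · rw [if_neg hmem]
          rw [groupOf_not_mem k L hmem]
          rfl
      · rw [if_neg hk, if_neg (fun (he : x = k) => hk he.symm), ih' k]
        simp [hk]

theorem sumLen_nil : sumLen [] = 0 := rfl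
theorem sumLen_cons (p L) : sumLen (p :: L) = p.length + sumLen L := by simp [sumLen]
theorem sumLen_append (L M) : sumLen (L ++ M) = sumLen L + sumLen M := by simp [sumLen]

theorem sumLen_group_le (ns : List Char) (L : List (List (List Char))) :
    sumLen (group ns L) ≤ sumLen L := by
  induction L with
  | nil => simp [group, sumLen]
  | cons p rest ih =>
    rcases p with _ | ⟨x, _ | ⟨y, r⟩⟩
    · rw [group_cons_short _ _ _ (by simp), sumLen_cons]; omega
    · rw [group_cons_short _ _ _ (by simp), sumLen_cons]; omega
    · rw [group_cons_long, sumLen_append, sumLen_cons]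
      by_cases h : x = ns
      · rw [if_pos h, sumLen_cons, sumLen_nil]
        simp only [List.length_cons]; omega
      · rw [if_neg h, sumLen_nil]; omega

theorem sumLen_group_lt (ns : List Char) (L : List (List (List Char))) (h : ns ∈ headsN L) :
    sumLen (group ns L) < sumLen L := by
  induction L with
  | nil => simp [headsN] at h
  | cons p rest ih =>
    rcases p with _ | ⟨x, _ | ⟨y, r⟩⟩
    · rw [group_cons_short _ _ _ (by simp), sumLen_cons]
      have := ih (by rwa [headsN_cons_short _ _ (by simp)] at h)
      omega
    · rw [group_cons_short _ _ _ (by simp), sumLen_cons]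
      have := ih (by rwa [headsN_cons_short _ _ (by simp)] at h)
      omega
    · rw [group_cons_long, sumLen_append, sumLen_cons]
      by_cases hx : x = ns
      · have h2 := sumLen_group_le ns rest
        rw [if_pos hx, sumLen_cons, sumLen_nil]
        simp only [List.length_cons]; omega
      · rw [headsN_cons_long, List.mem_cons] at h
        have := ih (h.resolve_left (fun he => hx he.symm))
        rw [if_neg hx, sumLen_nil]; omega

theorem mapFind?_some_mem : ∀ (m : NSMap) (k : List Char) (v : NSTree),
    mapFind? m k = some v → (k, v) ∈ mapEntries m
  | .nil, k, v => by simp [mapFind?]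
  | .cons k' w r, k, v => by
    by_cases h : k = k'
    · subst h
      intro hf
      have hv : w = v := by simpa [mapFind?] using hf
      subst hv
      simp [mapEntries]
    · simp only [mapFind?, if_neg h, mapEntries, List.mem_cons]
      intro hf; exact Or.inr (mapFind?_some_mem r k v hf)

theorem sizeT_mem_entries : ∀ (m : NSMap) (e : List Char × NSTree),
    e ∈ mapEntries m → sizeT e.2 ≤ sizeM m
  | .nil, e => by simp [mapEntries]
  | .cons k w r, e => by
    simp only [mapEntries, List.mem_cons]
    rintro (rfl | hm)
    · simp [sizeM]
    · have := sizeT_mem_entries r e hm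
      simp [sizeM]; omega

theorem sizeT_pos (t : NSTree) : 1 ≤ sizeT t := by
  rcases t with ⟨n, c, m⟩; simp [sizeT]

theorem entries_eq_map_keys : ∀ (m : NSMap), (mapKeys m).Nodup →
    mapEntries m = (mapKeys m).map
      (fun k => (k, ((mapFind? m k).getD (NSTree.mk none PySem.Set.empty NSMap.nil))))
  | .nil, _ => rfl
  | .cons k w r, h => by
    simp only [mapKeys, mapEntries, List.map_cons] at h ⊢
    have hk : k ∉ (mapEntries r).map Prod.fst := (List.nodup_cons.mp h).1
    have hnd := (List.nodup_cons.mp h).2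
    have ih := entries_eq_map_keys r (by simpa [mapKeys] using hnd)
    simp only [mapFind?]
    refine List.cons_eq_cons.mpr ⟨by simp, ?_⟩
    have hcong : ∀ k1 ∈ (mapEntries r).map Prod.fst,
        (k1, ((if k1 = k then some w else mapFind? r k1).getD (NSTree.mk none PySem.Set.empty NSMap.nil)))
          = (k1, ((mapFind? r k1).getD (NSTree.mk none PySem.Set.empty NSMap.nil))) := by
      intro k1 hk1
      rw [if_neg (fun (he : k1 = k) => hk (he ▸ hk1))]
    rw [List.map_congr_left hcong]
    simpa [mapKeys] using ih

theorem sorted_instconv {α : Type} (xs : List α) (key : α → List Char) (rev : Bool) :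
    PySem.List.sorted xs key rev
      = @PySem.List.sorted α (List Char)
          (@LinearOrder.toPartialOrder (List Char) inferInstance).toPreorder.toLT
          LinearOrder.toDecidableLT xs key rev := by
  congr 1

theorem sortedSet_eq_of_perm (xs ys : List (List Char)) (hp : xs.Perm ys) :
    PySem.List.sorted (PySem.Set.ofList xs) (fun x => x) false
      = PySem.List.sorted (PySem.Set.ofList ys) (fun x => x) false := by
  simp only [sorted_instconv]
  apply PySem.List.sorted_eq_sorted_of_perm _ _ _ (fun a b h => h)
  rw [List.perm_ext_iff_of_nodup (PySem.Set.nodup_ofList xs) (PySem.Set.nodup_ofList ys)]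
  intro a
  rw [PySem.Set.mem_ofList, PySem.Set.mem_ofList]
  exact ⟨fun h => hp.mem_iff.mp h, fun h => hp.mem_iff.mpr h⟩

theorem entries_sorted (nm : Option (List Char)) (L : List (List (List Char))) :
    PySem.List.sorted (mapEntries (nsSubs (Build nm L))) (fun e => e.1) false
      = (PySem.List.sorted (PySem.Set.ofList (headsN L)) (fun x => x) false).map
          (fun k => (k, Build (some k) (group k L))) := by
  have hkeys := build_keys nm L
  have hnd : (mapKeys (nsSubs (Build nm L))).Nodup := by
    rw [hkeys]; exact PySem.Set.nodup_ofList _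
  have hent := entries_eq_map_keys (nsSubs (Build nm L)) hnd
  have hent2 : mapEntries (nsSubs (Build nm L))
      = (PySem.Set.ofList (headsN L)).map (fun k => (k, Build (some k) (group k L))) := by
    rw [hent, hkeys]
    apply List.map_congr_left
    intro k hk
    have hmem : k ∈ headsN L := (PySem.Set.mem_ofList _ _).mp hk
    rw [build_find, if_pos hmem, Option.getD_some]
  simp only [sorted_instconv]
  apply PySem.List.sorted_eq_of_perm_of_pairwise_lt
  · rw [hent2]
    exact List.Perm.map _
      (@PySem.List.sorted_perm _ _
        (@LinearOrder.toPartialOrder (List Char) inferInstance).toPreorder.toLT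
        LinearOrder.toDecidableLT _ _ _)
  · have hpl := PySem.List.sorted_ofList_pairwise_lt (κ := List Char) (headsN L)
    exact List.pairwise_map.mpr (by simpa using hpl)

theorem emitB_perm : ∀ (g : Nat) (L L' : List (List (List Char))) (nm : Option (List Char)) (g' : Nat),
    L.Perm L' → sumLen L < g → sumLen L' < g' → emitB g L nm = emitB g' L' nm := by
  intro g
  induction g with
  | zero => intro L L' nm g' hp h1 h2; omega
  | succ g ih =>
    intro L L' nm g' hp h1 h2
    rcases g' with _ | g'
    · omega
    have hs1 : PySem.List.sorted (PySem.Set.ofList (heads1 L)) (fun x => x) false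
        = PySem.List.sorted (PySem.Set.ofList (heads1 L')) (fun x => x) false :=
      sortedSet_eq_of_perm _ _ ((hp.filter _).filterMap _)
    have hsN : PySem.List.sorted (PySem.Set.ofList (headsN L)) (fun x => x) false
        = PySem.List.sorted (PySem.Set.ofList (headsN L')) (fun x => x) false :=
      sortedSet_eq_of_perm _ _ ((hp.filter _).filterMap _)
    simp only [emitB]
    rw [← hs1, ← hsN]
    have hres2 : ∀ (init : List Char),
        (PySem.List.sorted (PySem.Set.ofList (headsN L)) (fun x => x) false).foldl
            (fun r ns => r ++ emitB g (group ns L) (some ns)) init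
          = (PySem.List.sorted (PySem.Set.ofList (headsN L)) (fun x => x) false).foldl
            (fun r ns => r ++ emitB g' (group ns L') (some ns)) init := by
      intro init
      apply PySem.List.foldl_congr_mem
      intro acc ns hns
      have hmem : ns ∈ headsN L := by
        rw [PySem.List.mem_sorted] at hns
        exact (PySem.Set.mem_ofList _ _).mp hns
      have hmem' : ns ∈ headsN L' := ((hp.filter _).filterMap _).mem_iff.mp hmem
      have hgp : (group ns L).Perm (group ns L') := ((hp.filter _).map _)
      rw [ih (group ns L) (group ns L') (some ns) g' hgp
        (lt_of_lt_of_le (sumLen_group_lt ns L hmem) (by omega))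
        (lt_of_lt_of_le (sumLen_group_lt ns L' hmem') (by omega))]
    rw [hres2]

theorem main_lemma : ∀ (f : Nat) (L : List (List (List Char))) (nm : Option (List Char)) (g : Nat),
    sizeT (Build nm L) ≤ f → sumLen L < g → toCxx f (Build nm L) = emitB g L nm := by
  intro f
  induction f with
  | zero =>
    intro L nm g h1 h2
    have := sizeT_pos (Build nm L); omega
  | succ f ih =>
    intro L nm g h1 h2
    rcases g with _ | g
    · omega
    rcases hB : Build nm L with ⟨n, c, m⟩
    have hname : n = nm := by have := build_name nm L; rwa [hB] at this
    have hcls : c = PySem.Set.ofList (heads1 L) := by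
      have := build_classes nm L; rwa [hB] at this
    have hes : PySem.List.sorted (mapEntries m) (fun e => e.1) false
        = (PySem.List.sorted (PySem.Set.ofList (headsN L)) (fun x => x) false).map
            (fun k => (k, Build (some k) (group k L))) := by
      have := entries_sorted nm L; rwa [hB] at this
    have hsize : sizeM m ≤ f := by
      rw [hB] at h1
      have : sizeT (NSTree.mk n c m) = sizeM m + 1 := rfl
      omega
    subst hname hcls
    simp only [toCxx, emitB]
    rw [hes, List.foldl_map]
    have hres2 : ∀ (init : List Char),
        (PySem.List.sorted (PySem.Set.ofList (headsN L)) (fun x => x) false).foldl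
            (fun r k => r ++ toCxx f (k, Build (some k) (group k L)).2) init
          = (PySem.List.sorted (PySem.Set.ofList (headsN L)) (fun x => x) false).foldl
            (fun r ns => r ++ emitB g (group ns L) (some ns)) init := by
      intro init
      apply PySem.List.foldl_congr_mem
      intro acc k hk
      have hmem : k ∈ headsN L := by
        rw [PySem.List.mem_sorted] at hk
        exact (PySem.Set.mem_ofList _ _).mp hk
      have hfind : mapFind? m k = some (Build (some k) (group k L)) := by
        have := build_find n L k; rw [hB] at this
        simpa [nsSubs, if_pos hmem] using this
      have hmem2 := mapFind?_some_mem m k _ hfind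
      have hs : sizeT (Build (some k) (group k L)) ≤ f :=
        le_trans (sizeT_mem_entries m _ hmem2) hsize
      rw [ih (group k L) (some k) g hs
        (lt_of_lt_of_le (sumLen_group_lt k L hmem) (by omega))]
    rw [hres2]

theorem ports_eq (types : List String) : gen_decls types = gen_decls_alt types := by
  unfold gen_decls gen_decls_alt
  have hroot : (PySem.List.sorted types (fun x => x) false).foldl
      (fun ns t => insertPath ns (splitPath t)) (NSTree.mk none PySem.Set.empty NSMap.nil)
      = Build none ((PySem.List.sorted types (fun x => x) false).map splitPath) := by
    rw [Build, List.foldl_map]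
  simp only [hroot]
  rw [main_lemma (sizeT (Build none ((PySem.List.sorted types (fun x => x) false).map splitPath)))
      ((PySem.List.sorted types (fun x => x) false).map splitPath) none
      (sumLen ((PySem.List.sorted types (fun x => x) false).map splitPath) + 1) le_rfl (by omega)]
  rw [emitB_perm (sumLen ((PySem.List.sorted types (fun x => x) false).map splitPath) + 1)
      ((PySem.List.sorted types (fun x => x) false).map splitPath)
      (types.map altSplit) none (sumLen (types.map altSplit) + 1)
      ((PySem.List.sorted_perm types (fun x => x) false).map splitPath)
      (by omega) (by omega)]

-- ===== VERDICT (by name: the statement is the Claim_ definition above) =====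
theorem gen_decls_spec : Claim_equal_gen_decls := by
  intro types _ _
  show gen_decls types = gen_decls_alt types
  exact ports_eq types
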